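-- pv_equiv track=rewrite | github.com/ICTAZ-CBU-SC/ChatSMS | Model/data_extractor.py | chunk_by_keywords
-- ===== SOURCE A (Python) =====
-- def chunk_by_keywords(text, keywords):
--     """
--     Breaks text into chunks whenever a line starts with a keyword (like question numbers).
--     """
--     chunks = []
--     current_chunk = []
--
--     for line in text.split("\n"):
--         if any(line.strip().lower().startswith(k.lower()) for k in keywords):
--             if current_chunk:
--                 chunks.append("\n".join(current_chunk).strip())
--                 current_chunk = []
--         current_chunk.append(line)
--
--     if current_chunk:
--         chunks.append("\n".join(current_chunk).strip())
--
--     return chunks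
-- ===== SOURCE B (Python) =====
-- def chunk_by_keywords(text, keywords):
--     """
--     Breaks text into chunks whenever a line starts with a keyword (like question numbers).
--     """
--     lows = [k.lower() for k in keywords]
--
--     def is_cut(line):
--         return any(line.strip().lower().startswith(k) for k in lows)
--
--     chunks = []
--     lines = text.split("\n")
--     while lines:
--         head, rest = lines[0], lines[1:]
--         k = 0
--         while k < len(rest) and not is_cut(rest[k]):
--             k += 1
--         chunks.append("\n".join([head] + rest[:k]).strip())
--         lines = rest[k:]
--     return chunks
-- ===== Notes on version B (the rewrite author's own statement) =====
-- stated objective: alternative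
-- what changed: Replaced A's single-pass accumulate-and-flush state machine (chunks/current_chunk lists mutated per line) by a per-chunk decomposition: split lines once, then repeatedly scan the longest run of non-keyword lines after each chunk head and slice it off, with keyword lowering hoisted out of the loop.
import Mathlib
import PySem

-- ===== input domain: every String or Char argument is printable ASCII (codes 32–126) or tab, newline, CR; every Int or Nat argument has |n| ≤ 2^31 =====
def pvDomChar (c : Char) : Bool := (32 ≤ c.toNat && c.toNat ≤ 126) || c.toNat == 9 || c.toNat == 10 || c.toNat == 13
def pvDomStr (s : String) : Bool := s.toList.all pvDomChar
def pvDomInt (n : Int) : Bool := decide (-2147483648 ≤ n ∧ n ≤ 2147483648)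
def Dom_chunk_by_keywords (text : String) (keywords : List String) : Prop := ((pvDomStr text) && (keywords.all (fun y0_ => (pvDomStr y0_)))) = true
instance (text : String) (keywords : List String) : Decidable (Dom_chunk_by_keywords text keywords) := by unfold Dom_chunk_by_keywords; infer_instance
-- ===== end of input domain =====

-- B replaces A's accumulate-and-flush state machine by a per-chunk scan (outer loop per
-- chunk, inner scan for the longest non-cut run) with keyword lowering hoisted out;
-- objective: alternative decomposition (not faster; the per-chunk slices copy).

-- ===== PORT A =====
-- text.split("\n"): the separator is the nonempty literal "\n", so Str.split? is always some
-- and .getD [] never supplies the default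
def chunk_by_keywords (text : String) (keywords : List String) : List String :=
  let st := (((PySem.Str.split? text "\n").getD [])).foldl
    (fun (st : List String × List String) line =>
      let st :=
        if keywords.any (fun k =>
            PySem.Str.startswith (PySem.Str.lower (PySem.Str.strip line)) (PySem.Str.lower k)) then
          if st.2 ≠ [] then
            (st.1 ++ [PySem.Str.strip (PySem.Str.join "\n" st.2)], ([] : List String))
          else st
        else st
      (st.1, st.2 ++ [line]))
    (([] : List String), ([] : List String))
  if st.2 ≠ [] then st.1 ++ [PySem.Str.strip (PySem.Str.join "\n" st.2)] else st.1

-- ===== PORT B =====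
-- the outer 'while lines:' loop of Source B; the inner index loop 'k = 0; while k < len(rest)
-- and not is_cut(rest[k]): k += 1' followed by 'rest[:k]' / 'rest[k:]' is ported exactly as
-- takeWhile / dropWhile of the non-cut predicate (k is the length of the longest non-cut prefix)
def chunkLoop (isCut : String → Bool) : List String → List String
  | [] => []
  | head :: rest =>
      PySem.Str.strip (PySem.Str.join "\n" (head :: rest.takeWhile (fun l => !isCut l)))
        :: chunkLoop isCut (rest.dropWhile (fun l => !isCut l))
  termination_by lines => lines.length
  decreasing_by
    exact Nat.lt_succ_of_le (List.length_dropWhile_le _ _)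

def chunk_by_keywords_alt (text : String) (keywords : List String) : List String :=
  let lows := keywords.map PySem.Str.lower
  let isCut := fun (line : String) =>
    lows.any (fun k => PySem.Str.startswith (PySem.Str.lower (PySem.Str.strip line)) k)
  chunkLoop isCut (((PySem.Str.split? text "\n").getD []))

-- ===== PRECONDITION & SPEC =====
def Spec_chunk_by_keywords (text : String) (keywords : List String) (out : List String) : Prop := out = chunk_by_keywords_alt text keywords
instance (text : String) (keywords : List String) (out : List String) : Decidable (Spec_chunk_by_keywords text keywords out) := by unfold Spec_chunk_by_keywords; infer_instance

-- ===== CLAIM (what is proved, stated in full; the proofs are below) =====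
def Claim_equal_chunk_by_keywords : Prop := ∀ (text : String) (keywords : List String), Dom_chunk_by_keywords text keywords → Spec_chunk_by_keywords text keywords (chunk_by_keywords text keywords)

-- ===== LEMMAS AND PROOFS =====

-- A's cut test, with the keyword lowering not yet hoisted
def cutA (keywords : List String) (line : String) : Bool :=
  keywords.any (fun k =>
    PySem.Str.startswith (PySem.Str.lower (PySem.Str.strip line)) (PySem.Str.lower k))

-- A's fold step and finish, named for the proofs
def stepA (keywords : List String) (st : List String × List String) (line : String) :
    List String × List String :=
  let st :=
    if cutA keywords line then
      if st.2 ≠ [] then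
        (st.1 ++ [PySem.Str.strip (PySem.Str.join "\n" st.2)], ([] : List String))
      else st
    else st
  (st.1, st.2 ++ [line])

def finA (st : List String × List String) : List String :=
  if st.2 ≠ [] then st.1 ++ [PySem.Str.strip (PySem.Str.join "\n" st.2)] else st.1

theorem chunk_by_keywords_eq_finA (text : String) (keywords : List String) :
    chunk_by_keywords text keywords =
      finA ((((PySem.Str.split? text "\n").getD [])).foldl (stepA keywords) ([], [])) := by
  rfl

theorem alt_eq_chunkLoop (text : String) (keywords : List String) :
    chunk_by_keywords_alt text keywords =
      chunkLoop (cutA keywords) (((PySem.Str.split? text "\n").getD [])) := by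
  have hcut : (fun (line : String) =>
      (keywords.map PySem.Str.lower).any
        (fun k => PySem.Str.startswith (PySem.Str.lower (PySem.Str.strip line)) k))
      = cutA keywords := by
    funext line; rw [List.any_map]; rfl
  show chunkLoop (fun line => (keywords.map PySem.Str.lower).any
      (fun k => PySem.Str.startswith (PySem.Str.lower (PySem.Str.strip line)) k)) _ = _
  rw [hcut]

-- the loop invariant: with a nonempty current chunk, A's remaining fold flushes at each cut,
-- which is exactly B's per-chunk decomposition of the remaining lines
theorem foldA_inv (keywords : List String) (lines : List String) :
    ∀ (chunks cur : List String), cur ≠ [] →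
      finA (lines.foldl (stepA keywords) (chunks, cur)) =
        chunks ++
          (PySem.Str.strip (PySem.Str.join "\n" (cur ++ lines.takeWhile (fun l => !cutA keywords l)))
            :: chunkLoop (cutA keywords) (lines.dropWhile (fun l => !cutA keywords l))) := by
  induction lines with
  | nil =>
      intro chunks cur hcur
      simp [finA, hcur, chunkLoop]
  | cons l rest ih =>
      intro chunks cur hcur
      by_cases hc : cutA keywords l = true
      · have hstep : stepA keywords (chunks, cur) l =
            (chunks ++ [PySem.Str.strip (PySem.Str.join "\n" cur)], [l]) := by
          simp [stepA, hc, hcur]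
        rw [List.foldl_cons, hstep, ih _ [l] (by simp)]
        rw [List.takeWhile_cons_of_neg (by simp [hc]),
            List.dropWhile_cons_of_neg (by simp [hc])]
        rw [chunkLoop]
        simp
      · have hstep : stepA keywords (chunks, cur) l = (chunks, cur ++ [l]) := by
          simp [stepA, hc]
        rw [List.foldl_cons, hstep, ih _ (cur ++ [l]) (by simp)]
        rw [List.takeWhile_cons_of_pos (by simp [hc]),
            List.dropWhile_cons_of_pos (by simp [hc])]
        simp

-- ===== VERDICT (by name: the statement is the Claim_ definition above) =====
theorem chunk_by_keywords_spec : Claim_equal_chunk_by_keywords := by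
  intro text keywords _
  unfold Spec_chunk_by_keywords
  rw [chunk_by_keywords_eq_finA, alt_eq_chunkLoop]
  cases h : ((PySem.Str.split? text "\n").getD []) with
  | nil => simp [finA, chunkLoop]
  | cons l rest =>
      have hfirst : stepA keywords ([], []) l = ([], [l]) := by
        simp [stepA]
      rw [List.foldl_cons, hfirst, foldA_inv keywords rest [] [l] (by simp)]
      rw [chunkLoop]
      simp
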